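-- pv_equiv track=rewrite | github.com/DK905/CoolResp | CoolResp.py | merged_cells
-- ===== SOURCE A (Python) =====
-- def merged_cells(row, col, cabs):
--     act = col-2
--     # Если есть предмет и правый сосед не кабинет - ячейка общая
--     if row[act] and not row[act+1]:
--         return [row[0], row[1], row[act], cabs]
--     # Если ячейка 100% не общая или строка пройдена - вернуть пустую запись
--     elif row[act+1] or act == 2 and not row[act]:
--         return[row[0], '', '', '']
--     else:
--         return merged_cells(row, act, cabs)
-- ===== SOURCE B (Python) =====
-- def merged_cells(row, col, cabs):
--     # single backward scan over the candidate columns instead of tail recursion: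
--     # stop at the first index whose cell or right neighbour is non-empty, or at 2
--     n = len(row)
--     for act in range(col - 2, -n - 1, -2):
--         if row[act] or row[act + 1] or act == 2:
--             if row[act] and not row[act + 1]:
--                 return [row[0], row[1], row[act], cabs]
--             return [row[0], '', '', '']
-- ===== Notes on version B (the rewrite author's own statement) =====
-- stated objective: simpler
-- what changed: Replaced A's tail recursion (three re-evaluated branches per call) by a single backward scan that finds the first stopping index in range(col-2, -len(row)-1, -2) and then decides the result with one branch.
import Mathlib
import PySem

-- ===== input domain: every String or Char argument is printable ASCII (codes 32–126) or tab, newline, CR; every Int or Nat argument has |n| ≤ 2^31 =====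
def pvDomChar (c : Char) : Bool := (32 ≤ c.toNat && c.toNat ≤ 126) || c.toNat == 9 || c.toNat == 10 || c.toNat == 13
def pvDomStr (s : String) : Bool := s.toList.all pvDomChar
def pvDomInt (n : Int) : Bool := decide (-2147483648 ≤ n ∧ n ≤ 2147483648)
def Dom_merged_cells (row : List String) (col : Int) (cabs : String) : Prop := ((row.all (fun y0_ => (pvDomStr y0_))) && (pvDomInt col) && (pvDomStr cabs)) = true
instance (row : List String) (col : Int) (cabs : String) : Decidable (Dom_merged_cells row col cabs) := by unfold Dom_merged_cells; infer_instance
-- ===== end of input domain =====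

-- B replaces A's tail recursion by a single backward scan (find-first over the
-- candidate index range) followed by one branch; objective: simpler.

-- ===== PORT A =====
-- Literal port of A's tail recursion.  Where Python raises IndexError (an index
-- access out of range) the port returns []; Pre_ excludes exactly those inputs.
-- Python evaluates row[act] and then row[act+1] before any return, so the two
-- accesses are guarded first, in that order.
def merged_cells (row : List String) (col : Int) (cabs : String) : List String :=
  let act := col - 2
  match h1 : PySem.List.pyGet? row act, h2 : PySem.List.pyGet? row (act + 1) with
  | some a, some b =>
    if a ≠ "" ∧ b = "" then
      -- return [row[0], row[1], row[act], cabs]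
      match PySem.List.pyGet? row 0, PySem.List.pyGet? row 1 with
      | some r0, some r1 => [r0, r1, a, cabs]
      | _, _ => []
    else if b ≠ "" ∨ (act = 2 ∧ a = "") then
      -- return [row[0], '', '', '']
      match PySem.List.pyGet? row 0 with
      | some r0 => [r0, "", "", ""]
      | none => []
    else merged_cells row act cabs
  | _, _ => []
termination_by (col + row.length + 2).toNat
decreasing_by
  have hin : PySem.Raise.InRange row.length (col - 2) := by
    by_contra hc
    rw [← PySem.List.pyGet?_eq_none_iff] at hc
    rw [h1] at hc
    exact Option.some_ne_none a hc
  obtain ⟨hlo, _⟩ := hin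
  omega

-- ===== PORT B =====
-- Port of Source B: one pass over range(col-2, -len(row)-1, -2) finding the first
-- stopping index (find?), then a single branch.  Indices visited by the scan lie
-- in [-len(row), len(row)-2], so row[a] is pyGetD.  When the loop in Source B falls
-- through (Python B returns None) the port returns []; Pre_ excludes those inputs.
def merged_cells_alt (row : List String) (col : Int) (cabs : String) : List String :=
  let n : Int := row.length
  match (PySem.List.pyRange (col - 2) (-n - 1) (-2)).find?
      (fun a => (PySem.List.pyGetD row a "" != "") || (PySem.List.pyGetD row (a + 1) "" != "") || (a == 2)) with
  | some act =>
    if PySem.List.pyGetD row act "" ≠ "" ∧ PySem.List.pyGetD row (act + 1) "" = "" then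
      [PySem.List.pyGetD row 0 "", PySem.List.pyGetD row 1 "", PySem.List.pyGetD row act "", cabs]
    else
      [PySem.List.pyGetD row 0 "", "", "", ""]
  | none => []

-- ===== PRECONDITION & SPEC =====
-- Pre_ is exactly the set of inputs on which Python A returns (everywhere else A
-- raises IndexError): the first access row[col-2], row[col-1] must be in range and
-- the backward scan must meet a stopping index before falling below -len(row).
def Pre_merged_cells (row : List String) (col : Int) (cabs : String) : Prop :=
  col ≤ (row.length : Int) ∧ -(row.length : Int) ≤ col - 2 ∧
  ∃ a ∈ PySem.List.pyRange (col - 2) (-(row.length : Int) - 1) (-2),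
    (PySem.List.pyGetD row a "" ≠ "" ∨ PySem.List.pyGetD row (a + 1) "" ≠ "" ∨ a = 2)
instance (row : List String) (col : Int) (cabs : String) : Decidable (Pre_merged_cells row col cabs) := by
  unfold Pre_merged_cells; infer_instance

def pvWitness_merged_cells : List String × Int × String := (["h", "d", "x", "", ""], 4, "C")

def Spec_merged_cells (row : List String) (col : Int) (cabs : String) (out : List String) : Prop := out = merged_cells_alt row col cabs
instance (row : List String) (col : Int) (cabs : String) (out : List String) : Decidable (Spec_merged_cells row col cabs out) := by unfold Spec_merged_cells; infer_instance

-- ===== CLAIM (what is proved, stated in full; the proofs are below) =====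
def Claim_equal_merged_cells : Prop := ∀ (row : List String) (col : Int) (cabs : String), Dom_merged_cells row col cabs → Pre_merged_cells row col cabs → Spec_merged_cells row col cabs (merged_cells row col cabs)

-- ===== LEMMAS AND PROOFS =====

theorem pyRange_neg_two_nil (a b : Int) (h : a ≤ b) : PySem.List.pyRange a b (-2) = [] := by
  simp [PySem.List.pyRange]
  omega

theorem pyRange_neg_two_cons (a b : Int) (h : b < a) :
    PySem.List.pyRange a b (-2) = a :: PySem.List.pyRange (a - 2) b (-2) := by
  simp only [PySem.List.pyRange]
  norm_num
  have hc : (if b < a then ((a - b + 2 - 1) / 2).toNat else 0)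
      = (if b < a - 2 then ((a - 2 - b + 2 - 1) / 2).toNat else 0) + 1 := by
    split_ifs <;> omega
  rw [hc, List.range_succ_eq_map, List.map_cons, List.map_map]
  congr 1
  · push_cast; ring
  refine List.map_congr_left (fun k _ => ?_)
  simp only [Function.comp_apply, Nat.succ_eq_add_one]
  push_cast
  ring

theorem pyGet?_eq_some_pyGetD {α : Type} (xs : List α) (i : Int) (d : α)
    (h : PySem.Raise.InRange xs.length i) :
    PySem.List.pyGet? xs i = some (PySem.List.pyGetD xs i d) := by
  cases hx : PySem.List.pyGet? xs i with
  | none => exact absurd h ((PySem.List.pyGet?_eq_none_iff xs i).mp hx)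
  | some x => simp [PySem.List.pyGetD, hx]

theorem merged_cells_agree_aux (row : List String) (cabs : String) :
    ∀ (k : Nat) (col : Int), (col + row.length).toNat ≤ k →
    col ≤ (row.length : Int) → -(row.length : Int) ≤ col - 2 →
    (∃ a ∈ PySem.List.pyRange (col - 2) (-(row.length : Int) - 1) (-2),
      (PySem.List.pyGetD row a "" ≠ "" ∨ PySem.List.pyGetD row (a + 1) "" ≠ "" ∨ a = 2)) →
    merged_cells row col cabs = merged_cells_alt row col cabs := by
  intro k
  induction k with
  | zero => intro col hk h1 h2 h3; omega
  | succ k ih =>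
    intro col hk h1 h2 h3
    have hL1 : (1 : Int) ≤ row.length := by omega
    have hinA : PySem.Raise.InRange row.length (col - 2) := ⟨by omega, by omega⟩
    have hinB : PySem.Raise.InRange row.length (col - 2 + 1) := ⟨by omega, by omega⟩
    have hin0 : PySem.Raise.InRange row.length 0 := ⟨by omega, by omega⟩
    have hga := pyGet?_eq_some_pyGetD row (col - 2) "" hinA
    have hgb := pyGet?_eq_some_pyGetD row (col - 2 + 1) "" hinB
    have hg0 := pyGet?_eq_some_pyGetD row 0 "" hin0
    have hcons : PySem.List.pyRange (col - 2) (-(row.length : Int) - 1) (-2)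
        = (col - 2) :: PySem.List.pyRange (col - 4) (-(row.length : Int) - 1) (-2) := by
      have := pyRange_neg_two_cons (col - 2) (-(row.length : Int) - 1) (by omega)
      simpa [show col - 2 - 2 = col - 4 by ring] using this
    set a := PySem.List.pyGetD row (col - 2) "" with ha
    set b := PySem.List.pyGetD row (col - 2 + 1) "" with hb
    by_cases hstop : a ≠ "" ∨ b ≠ "" ∨ col - 2 = 2
    · -- the scan stops at col-2: both sides return here
      have hpred : (fun x => (PySem.List.pyGetD row x "" != "") || (PySem.List.pyGetD row (x + 1) "" != "") || (x == 2)) (col - 2) = true := by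
        simp only [Bool.or_eq_true, bne_iff_ne, beq_iff_eq]
        tauto
      have hfind := List.find?_cons_of_pos (p := fun x => (PySem.List.pyGetD row x "" != "") || (PySem.List.pyGetD row (x + 1) "" != "") || (x == 2)) (a := col - 2) (l := PySem.List.pyRange (col - 4) (-(row.length : Int) - 1) (-2)) hpred
      rw [merged_cells]
      rw [hga, hgb]
      simp only [merged_cells_alt, hcons, hfind]
      by_cases hfull : a ≠ "" ∧ b = ""
      · -- the "shared cell" branch: row[1] is also accessed, so 2 ≤ len(row)
        have hL2 : (2 : Int) ≤ row.length := by
          by_contra hc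
          have hl : row.length = 1 := by omega
          have hact : col - 2 = -1 := by omega
          obtain ⟨x, hx⟩ := List.length_eq_one_iff.mp hl
          apply hfull.1
          have hab : a = b := by
            rw [ha, hb, hact, hx]
            norm_num
            simp [PySem.List.pyGetD, PySem.List.pyGet?_neg_one]
          rw [hab, hfull.2]
        have hin1 : PySem.Raise.InRange row.length 1 := ⟨by omega, by omega⟩
        have hg1 := pyGet?_eq_some_pyGetD row 1 "" hin1
        rw [if_pos hfull, if_pos hfull, hg0, hg1]
      · rw [if_neg hfull, if_neg hfull, hg0]
        have helif : b ≠ "" ∨ (col - 2 = 2 ∧ a = "") := by tauto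
        rw [if_pos helif]
    · -- no stop here: A recurses, B's find? moves to the tail
      obtain ⟨hae, hbe, hne2⟩ : a = "" ∧ b = "" ∧ ¬(col - 2 = 2) := by tauto
      have hpred : (fun x => (PySem.List.pyGetD row x "" != "") || (PySem.List.pyGetD row (x + 1) "" != "") || (x == 2)) (col - 2) = false := by
        simp only [Bool.or_eq_false_iff, bne_eq_false_iff_eq, beq_eq_false_iff_ne]
        exact ⟨⟨by rw [← ha]; exact hae, by rw [← hb]; exact hbe⟩, hne2⟩
      have h3' : ∃ x ∈ PySem.List.pyRange (col - 4) (-(row.length : Int) - 1) (-2),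
          (PySem.List.pyGetD row x "" ≠ "" ∨ PySem.List.pyGetD row (x + 1) "" ≠ "" ∨ x = 2) := by
        obtain ⟨x, hxmem, hxstop⟩ := h3
        rw [hcons] at hxmem
        rcases List.mem_cons.mp hxmem with hhead | htail
        · exfalso
          rw [hhead] at hxstop
          rcases hxstop with hq | hq | hq
          · rw [← ha] at hq; exact hq hae
          · rw [← hb] at hq; exact hq hbe
          · exact hne2 hq
        · exact ⟨x, htail, hxstop⟩
      have htail_ne : PySem.List.pyRange (col - 4) (-(row.length : Int) - 1) (-2) ≠ [] := by
        obtain ⟨x, hxmem, _⟩ := h3'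
        exact List.ne_nil_of_mem hxmem
      have h2' : -(row.length : Int) ≤ (col - 2) - 2 := by
        by_contra hc
        exact htail_ne (pyRange_neg_two_nil (col - 4) (-(row.length : Int) - 1) (by omega))
      rw [merged_cells]
      rw [hga, hgb]
      simp only [← ha, ← hb]
      have hafalse : ¬(a ≠ "" ∧ b = "") := fun hcc => hcc.1 hae
      have helif : ¬(b ≠ "" ∨ (col - 2 = 2 ∧ a = "")) := by tauto
      rw [if_neg hafalse, if_neg helif]
      have hBstep : merged_cells_alt row col cabs = merged_cells_alt row (col - 2) cabs := by
        have hfind := List.find?_cons_of_neg (p := fun x => (PySem.List.pyGetD row x "" != "") || (PySem.List.pyGetD row (x + 1) "" != "") || (x == 2)) (a := col - 2) (l := PySem.List.pyRange (col - 4) (-(row.length : Int) - 1) (-2)) (by simp [hpred])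
        simp only [merged_cells_alt, hcons, hfind]
        have hco : col - 2 - 2 = col - 4 := by ring
        rw [hco]
      rw [hBstep]
      refine ih (col - 2) (by omega) (by omega) h2' ?_
      have hco : col - 2 - 2 = col - 4 := by ring
      rw [hco]; exact h3'


theorem merged_cells_agree (row : List String) (col : Int) (cabs : String)
    (h1 : col ≤ (row.length : Int)) (h2 : -(row.length : Int) ≤ col - 2)
    (h3 : ∃ a ∈ PySem.List.pyRange (col - 2) (-(row.length : Int) - 1) (-2),
      (PySem.List.pyGetD row a "" ≠ "" ∨ PySem.List.pyGetD row (a + 1) "" ≠ "" ∨ a = 2)) :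
    merged_cells row col cabs = merged_cells_alt row col cabs := by
  exact merged_cells_agree_aux row cabs (col + row.length).toNat col le_rfl h1 h2 h3

-- ===== VERDICT (by name: the statement is the Claim_ definition above) =====
theorem merged_cells_spec : Claim_equal_merged_cells := by
  intro row col cabs _ hpre
  obtain ⟨h1, h2, h3⟩ := hpre
  exact merged_cells_agree row col cabs h1 h2 h3
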